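-- pv_equiv track=rewrite | github.com/spintronic-computing-group/spnc | notebooks/SPNC-anisotropy/SP_anisotropy_mask.py | mask_switch
-- ===== SOURCE A (Python) =====
-- def mask_switch(m0,Nvirt,K_switch_max):
--     #Mask with as many "combinations of products" as possible
--     mask = []
--     K_switch = 1
--     k_current = 0
--     sign = 1
--     while len(mask)<Nvirt:
--         mask.append(sign*m0)
--         k_current += 1
--         if k_current==K_switch:
--             k_current = 0
--             if sign==1:
--                 sign=-1
--             else:
--                 sign=1
--                 K_switch+=1
--                 if K_switch>K_switch_max:
--                     K_switch=1
--     return(mask)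
-- ===== SOURCE B (Python) =====
-- def mask_switch(m0, Nvirt, K_switch_max):
--     # Build the mask in whole +/- runs (block at a time) instead of a
--     # per-element state machine, then truncate to exactly Nvirt.
--     mask = []
--     K = 1
--     while len(mask) < Nvirt:
--         mask += [m0] * K + [-m0] * K
--         K = K + 1 if K < K_switch_max else 1
--     return mask[:max(Nvirt, 0)]
-- ===== Notes on version B (the rewrite author's own statement) =====
-- stated objective: simpler
-- what changed: Replaces A's per-element state machine (K_switch/k_current/sign bookkeeping per appended element) by building the mask a whole +/- run at a time with list repetition and a final truncation to Nvirt.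
import Mathlib
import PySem

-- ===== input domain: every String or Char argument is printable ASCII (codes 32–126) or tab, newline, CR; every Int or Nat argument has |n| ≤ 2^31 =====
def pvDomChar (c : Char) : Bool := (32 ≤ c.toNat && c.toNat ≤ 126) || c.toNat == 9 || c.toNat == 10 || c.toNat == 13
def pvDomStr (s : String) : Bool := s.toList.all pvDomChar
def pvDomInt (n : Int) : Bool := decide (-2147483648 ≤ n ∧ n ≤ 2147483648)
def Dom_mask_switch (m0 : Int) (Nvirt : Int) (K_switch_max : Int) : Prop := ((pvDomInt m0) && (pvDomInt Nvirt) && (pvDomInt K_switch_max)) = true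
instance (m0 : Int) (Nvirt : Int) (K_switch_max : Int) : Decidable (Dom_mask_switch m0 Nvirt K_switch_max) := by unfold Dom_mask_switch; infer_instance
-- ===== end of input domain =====

-- B builds the mask one whole +/- run at a time and truncates, instead of A's
-- per-element state machine; same cost, simpler structure. No side effects.

-- ===== PORT A =====
-- A's while-loop with state (mask, K_switch, k_current, sign); terminates
-- because each iteration appends one element.
def maskSwitchLoop (m0 : Int) (Nvirt : Int) (K_switch_max : Int)
    (mask : List Int) (K_switch : Int) (k_current : Int) (sign : Int) : List Int :=
  if h : (mask.length : Int) < Nvirt then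
    let mask' := mask ++ [sign * m0]
    let k' := k_current + 1
    if k' = K_switch then
      if sign = 1 then
        maskSwitchLoop m0 Nvirt K_switch_max mask' K_switch 0 (-1)
      else
        if K_switch + 1 > K_switch_max then
          maskSwitchLoop m0 Nvirt K_switch_max mask' 1 0 1
        else
          maskSwitchLoop m0 Nvirt K_switch_max mask' (K_switch + 1) 0 1
    else
      maskSwitchLoop m0 Nvirt K_switch_max mask' K_switch k' sign
  else mask
termination_by (Nvirt - mask.length).toNat
decreasing_by all_goals simp [List.length_append] at *; omega

def mask_switch (m0 : Int) (Nvirt : Int) (K_switch_max : Int) : List Int :=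
  maskSwitchLoop m0 Nvirt K_switch_max [] 1 0 1

-- ===== PORT B =====
-- B's while-loop. The Python variable K (always ≥ 1) is carried as j : Nat
-- with K = j + 1, which is exact on every reachable state and makes each
-- iteration append ≥ 2 elements (termination).
def maskAltLoop (m0 : Int) (Nvirt : Int) (K_switch_max : Int)
    (mask : List Int) (j : Nat) : List Int :=
  if h : (mask.length : Int) < Nvirt then
    maskAltLoop m0 Nvirt K_switch_max
      (mask ++ List.replicate (j + 1) m0 ++ List.replicate (j + 1) (-m0))
      (if ((j : Int) + 1) < K_switch_max then j + 1 else 0)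
  else mask
termination_by (Nvirt - mask.length).toNat
decreasing_by simp [List.length_append] at *; omega

def mask_switch_alt (m0 : Int) (Nvirt : Int) (K_switch_max : Int) : List Int :=
  (maskAltLoop m0 Nvirt K_switch_max [] 0).take (max Nvirt 0).toNat

-- ===== PRECONDITION & SPEC =====
def Spec_mask_switch (m0 : Int) (Nvirt : Int) (K_switch_max : Int) (out : List Int) : Prop := out = mask_switch_alt m0 Nvirt K_switch_max
instance (m0 : Int) (Nvirt : Int) (K_switch_max : Int) (out : List Int) : Decidable (Spec_mask_switch m0 Nvirt K_switch_max out) := by unfold Spec_mask_switch; infer_instance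

-- ===== CLAIM (what is proved, stated in full; the proofs are below) =====
def Claim_equal_mask_switch : Prop := ∀ (m0 : Int) (Nvirt : Int) (K_switch_max : Int), Dom_mask_switch m0 Nvirt K_switch_max → Spec_mask_switch m0 Nvirt K_switch_max (mask_switch m0 Nvirt K_switch_max)

-- ===== LEMMAS AND PROOFS =====

-- Fuel-indexed generator for A's machine: exactly n further elements.
def genA (m0 : Int) (K_switch_max : Int) : Nat → Int → Int → Int → List Int
  | 0, _, _, _ => []
  | n + 1, K, k, sign =>
    sign * m0 ::
      (if k + 1 = K then
        (if sign = 1 then genA m0 K_switch_max n K 0 (-1)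
         else if K + 1 > K_switch_max then genA m0 K_switch_max n 1 0 1
         else genA m0 K_switch_max n (K + 1) 0 1)
      else genA m0 K_switch_max n K (k + 1) sign)

-- Fuel-indexed generator for B's loop: appends whole runs until fuel is used up.
def genB (m0 : Int) (K_switch_max : Int) : Nat → Nat → List Int
  | 0, _ => []
  | n + 1, j =>
    List.replicate (j + 1) m0 ++ List.replicate (j + 1) (-m0) ++
      genB m0 K_switch_max (n + 1 - (j + 1) - (j + 1))
        (if ((j : Int) + 1) < K_switch_max then j + 1 else 0)
decreasing_by omega

lemma genA_zero (m0 Kmax K k sign : Int) : genA m0 Kmax 0 K k sign = [] := rfl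

lemma maskSwitchLoop_eq_genA (m0 Nvirt Kmax : Int) :
    ∀ (mask : List Int) (K k sign : Int),
      maskSwitchLoop m0 Nvirt Kmax mask K k sign
        = mask ++ genA m0 Kmax (Nvirt - mask.length).toNat K k sign := by
  intro mask K k sign
  generalize hn : (Nvirt - (mask.length : Int)).toNat = n
  induction n generalizing mask K k sign with
  | zero =>
      rw [maskSwitchLoop]
      rw [dif_neg (by omega)]
      simp [genA_zero]
  | succ n ih =>
      rw [maskSwitchLoop]
      rw [dif_pos (by omega)]
      have hlen : ∀ x : Int, (Nvirt - ((mask ++ [x]).length : Int)).toNat = n := by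
        intro x; simp [List.length_append]; omega
      simp only []
      rw [genA]
      split_ifs with h1 h2 h3
      · rw [ih _ _ _ _ (hlen _)]; simp
      · rw [ih _ _ _ _ (hlen _)]; simp
      · rw [ih _ _ _ _ (hlen _)]; simp
      · rw [ih _ _ _ _ (hlen _)]; simp

lemma maskAltLoop_eq_genB (m0 Nvirt Kmax : Int) :
    ∀ (mask : List Int) (j : Nat),
      maskAltLoop m0 Nvirt Kmax mask j
        = mask ++ genB m0 Kmax (Nvirt - mask.length).toNat j := by
  intro mask j
  generalize hn : (Nvirt - (mask.length : Int)).toNat = n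
  induction n using Nat.strong_induction_on generalizing mask j with
  | _ n ih =>
    match n with
    | 0 =>
        rw [maskAltLoop]
        rw [dif_neg (by omega)]
        simp [genB]
    | Nat.succ n =>
        rw [maskAltLoop]
        rw [dif_pos (by omega)]
        rw [ih (n + 1 - (j + 1) - (j + 1)) (by omega) _ _
          (by simp [List.length_append]; omega)]
        rw [genB]
        simp [List.append_assoc]

-- Running A through one half-run: c ≥ 1 steps of constant sign (k = K - c),
-- then the sign/K transition.
lemma genA_run (m0 Kmax : Int) :
    ∀ (c : Nat), 1 ≤ c → ∀ (n : Nat) (K sign : Int),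
      genA m0 Kmax n K (K - c) sign
        = List.replicate (min n c) (sign * m0) ++
            (if sign = 1 then genA m0 Kmax (n - c) K 0 (-1)
             else if K + 1 > Kmax then genA m0 Kmax (n - c) 1 0 1
             else genA m0 Kmax (n - c) (K + 1) 0 1) := by
  intro c hc
  induction c with
  | zero => omega
  | succ c ih =>
      intro n K sign
      match n with
      | 0 =>
          split_ifs <;> simp [genA_zero]
      | Nat.succ n =>
          rw [genA]
          by_cases hc0 : c = 0
          · subst hc0
            rw [if_pos (by push_cast; ring)]
            have : min (n + 1) 1 = 1 := by omega
            simp [List.replicate_succ]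
          · rw [if_neg (by push_cast; intro h; omega)]
            have hK : K - ((c + 1 : Nat) : Int) + 1 = K - (c : Int) := by push_cast; ring
            rw [hK, ih (by omega) n K sign]
            have hmin : min (n + 1) (c + 1) = min n c + 1 := by omega
            have hsub : n + 1 - (c + 1) = n - c := by omega
            rw [hmin, hsub, List.replicate_succ]
            simp

-- Core: A's stream from a canonical state (K = j+1, start of a + run) is the
-- n-prefix of B's run-at-a-time stream.
lemma genA_eq_take_genB (m0 Kmax : Int) :
    ∀ (n : Nat) (j : Nat),
      genA m0 Kmax n ((j : Int) + 1) 0 1 = (genB m0 Kmax n j).take n := by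
  intro n
  induction n using Nat.strong_induction_on with
  | _ n ih =>
    intro j
    match n with
    | 0 => simp [genA_zero, genB]
    | Nat.succ n =>
      have h0 : (0 : Int) = ((j : Int) + 1) - ((j + 1 : Nat) : Int) := by push_cast; ring
      rw [h0, genA_run m0 Kmax (j + 1) (by omega)]
      rw [if_pos rfl]
      rw [h0, genA_run m0 Kmax (j + 1) (by omega)]
      rw [if_neg (by norm_num)]
      rw [genB]
      rw [List.take_append, List.take_append]
      rw [List.take_replicate, List.take_replicate]
      simp only [List.length_append, List.length_replicate]
      have hsub : Nat.succ n - (j + 1 + (j + 1)) = n + 1 - (j + 1) - (j + 1) := by omega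
      rw [hsub]
      rw [← ih (n + 1 - (j + 1) - (j + 1)) (by omega)]
      simp only [one_mul, neg_one_mul, List.append_assoc]
      congr 2
      have hfuel2 : Nat.succ n - (j + 1) - (j + 1) = n + 1 - (j + 1) - (j + 1) := by omega
      rw [hfuel2]
      split_ifs with h1 h2 h2 <;> first | (exfalso; omega) | norm_num

-- ===== VERDICT (by name: the statement is the Claim_ definition above) =====
theorem mask_switch_spec : Claim_equal_mask_switch := by
  intro m0 Nvirt Kmax _
  show mask_switch m0 Nvirt Kmax = mask_switch_alt m0 Nvirt Kmax
  unfold mask_switch mask_switch_alt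
  rw [maskSwitchLoop_eq_genA, maskAltLoop_eq_genB]
  simp only [List.length_nil, Nat.cast_zero, sub_zero, List.nil_append]
  have h := genA_eq_take_genB m0 Kmax Nvirt.toNat 0
  norm_num at h
  rw [h]
  congr 1
  omega
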